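-- pv_equiv track=rewrite | github.com/KeerthikaK98/MbtaWinter2026 | src/exchange_agent/exchange_server.py | is_greeting_or_simple_query
-- ===== SOURCE A (Python) =====
-- def is_greeting_or_simple_query(query: str) -> bool:
--     """Fast pattern matching to detect greetings and simple queries."""
--     query_lower = query.lower().strip()
--
--     word_count = len(query_lower.split())
--     if word_count > 10:
--         return False
--
--     greeting_patterns = [
--         'hi', 'hello', 'hey', 'greetings', 'good morning',
--         'good afternoon', 'good evening', 'howdy', 'sup', 'yo'
--     ]
--
--     return any(
--         query_lower == greeting or query_lower.startswith(greeting + " ")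
--         for greeting in greeting_patterns
--     )
-- ===== SOURCE B (Python) =====
-- GREETINGS = frozenset([
--     'hi', 'hello', 'hey', 'greetings', 'good morning',
--     'good afternoon', 'good evening', 'howdy', 'sup', 'yo'
-- ])
--
--
-- def is_greeting_or_simple_query(query: str) -> bool:
--     """Single left-to-right scan: test each space-delimited prefix against the greeting set."""
--     q = query.lower().strip()
--     if len(q.split()) > 10:
--         return False
--     prefix = ''
--     for ch in q:
--         if ch == ' ' and prefix in GREETINGS:
--             return True
--         prefix += ch
--     return prefix in GREETINGS
-- ===== Notes on version B (the rewrite author's own statement) =====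
-- stated objective: alternative
-- what changed: A scans all ten greeting patterns testing equality and startswith for each; B makes a single left-to-right pass over the query, checking each space-delimited prefix (and the whole string) against a greeting set once.
import Mathlib
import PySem

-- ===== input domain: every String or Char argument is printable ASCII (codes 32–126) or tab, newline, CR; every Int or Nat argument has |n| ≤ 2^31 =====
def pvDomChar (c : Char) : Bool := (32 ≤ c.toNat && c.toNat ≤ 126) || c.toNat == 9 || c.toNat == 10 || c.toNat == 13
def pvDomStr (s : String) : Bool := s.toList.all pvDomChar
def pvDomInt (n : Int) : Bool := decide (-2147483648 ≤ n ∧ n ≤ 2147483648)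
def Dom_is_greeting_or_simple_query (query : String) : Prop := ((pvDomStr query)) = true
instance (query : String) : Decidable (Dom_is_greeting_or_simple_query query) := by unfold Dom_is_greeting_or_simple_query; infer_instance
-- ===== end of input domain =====

-- B replaces A's scan over the ten greeting patterns (one equality + one startswith per pattern)
-- by a single left-to-right scan of the query that tests each space-delimited prefix against a
-- greeting set once (objective: alternative — one pass over the string instead of ten substring scans).

-- ===== PORT A =====
def pvGreetingPatterns : List (List Char) :=
  [['h','i'], ['h','e','l','l','o'], ['h','e','y'], ['g','r','e','e','t','i','n','g','s'],
   ['g','o','o','d',' ','m','o','r','n','i','n','g'],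
   ['g','o','o','d',' ','a','f','t','e','r','n','o','o','n'],
   ['g','o','o','d',' ','e','v','e','n','i','n','g'],
   ['h','o','w','d','y'], ['s','u','p'], ['y','o']]

def is_greeting_or_simple_query (query : String) : Bool :=
  let query_lower := PySem.Chars.strip (PySem.Chars.lower query.toList)
  let word_count := (PySem.Chars.split₀ query_lower).length
  if word_count > 10 then false
  else pvGreetingPatterns.any (fun g =>
    query_lower == g || PySem.Chars.startswith query_lower (g ++ [' ']))

-- ===== PORT B =====
def pvGreetings : List (List Char) :=
  ["hi", "hello", "hey", "greetings", "good morning",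
   "good afternoon", "good evening", "howdy", "sup", "yo"].map String.toList

-- the 'for ch in q' loop of Source B: 'prefix' is the characters consumed so far, the second
-- argument the characters still to scan
def pvScan : List Char → List Char → Bool
  | pre, [] => pvGreetings.contains pre
  | pre, c :: rest =>
      if c = ' ' ∧ pre ∈ pvGreetings then true
      else pvScan (pre ++ [c]) rest

def is_greeting_or_simple_query_alt (query : String) : Bool :=
  let q := PySem.Chars.strip (PySem.Chars.lower query.toList)
  if (PySem.Chars.split₀ q).length > 10 then false
  else pvScan [] q

-- ===== PRECONDITION & SPEC =====
def Spec_is_greeting_or_simple_query (query : String) (out : Bool) : Prop := out = is_greeting_or_simple_query_alt query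
instance (query : String) (out : Bool) : Decidable (Spec_is_greeting_or_simple_query query out) := by unfold Spec_is_greeting_or_simple_query; infer_instance

-- ===== CLAIM (what is proved, stated in full; the proofs are below) =====
def Claim_equal_is_greeting_or_simple_query : Prop := ∀ (query : String), Dom_is_greeting_or_simple_query query → Spec_is_greeting_or_simple_query query (is_greeting_or_simple_query query)

-- ===== LEMMAS AND PROOFS =====

-- The scan accepts iff some prefix of the input that ends at a space (or is the whole input),
-- extended by the characters already consumed, is a greeting.
lemma pvScan_iff (rest : List Char) : ∀ (pre : List Char),
    pvScan pre rest = true ↔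
      (∃ u v, rest = u ++ ' ' :: v ∧ (pre ++ u) ∈ pvGreetings) ∨ (pre ++ rest) ∈ pvGreetings := by
  induction rest with
  | nil =>
    intro pre
    simp [pvScan]
  | cons c t ih =>
    intro pre
    simp only [pvScan]
    by_cases hcp : c = ' ' ∧ pre ∈ pvGreetings
    · rw [if_pos hcp]
      obtain ⟨rfl, hp⟩ := hcp
      simp only [true_iff]
      exact Or.inl ⟨[], t, by simp, by simpa using hp⟩
    · rw [if_neg hcp, ih]
      constructor
      · rintro (⟨u, v, rfl, hu⟩ | h)
        · exact Or.inl ⟨c :: u, v, by simp, by simpa using hu⟩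
        · exact Or.inr (by simpa using h)
      · rintro (⟨u, v, huv, hu⟩ | h)
        · cases u with
          | nil =>
            exfalso
            have hc : c = ' ' := by simpa using congrArg List.headI huv
            exact hcp ⟨hc, by simpa using hu⟩
          | cons x u' =>
            have hx : c = x := by simpa using congrArg List.headI huv
            have ht : t = u' ++ ' ' :: v := by simpa using congrArg List.tail huv
            exact Or.inl ⟨u', v, ht, by simpa [← hx] using hu⟩
        · exact Or.inr (by simpa using h)

lemma pvSets_eq : pvGreetings = pvGreetingPatterns := by decide

-- A's pattern scan agrees with B's prefix scan on any character list.
lemma pvMain (q : List Char) :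
    pvGreetingPatterns.any (fun g =>
      q == g || PySem.Chars.startswith q (g ++ [' '])) = pvScan [] q := by
  rw [Bool.eq_iff_iff, pvScan_iff]
  simp only [List.any_eq_true, Bool.or_eq_true, beq_iff_eq, PySem.Chars.startswith_iff,
    List.nil_append, ← pvSets_eq]
  constructor
  · rintro ⟨g, hg, rfl | ⟨t, ht⟩⟩
    · exact Or.inr hg
    · exact Or.inl ⟨g, t, by simpa using ht.symm, hg⟩
  · rintro (⟨u, v, rfl, hu⟩ | h)
    · exact ⟨u, hu, Or.inr ⟨v, by simp⟩⟩
    · exact ⟨q, h, Or.inl rfl⟩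

-- ===== VERDICT (by name: the statement is the Claim_ definition above) =====
theorem is_greeting_or_simple_query_spec : Claim_equal_is_greeting_or_simple_query := by
  intro query _
  unfold Spec_is_greeting_or_simple_query is_greeting_or_simple_query is_greeting_or_simple_query_alt
  by_cases h : (PySem.Chars.split₀ (PySem.Chars.strip (PySem.Chars.lower query.toList))).length > 10
  · simp [h]
  · simp only [h, if_false]
    exact pvMain _
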